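-- pv_equiv track=rewrite | github.com/Andre-devv/LSDIPro-SilkMoth | src/silkmoth/verifier.py | reduce_sets
-- ===== SOURCE A (Python) =====
-- def reduce_sets(reference_set: list, source_set: list) -> tuple:
--     """
--     Applies the triangle inequality reduction by removing every element from
--     both sets that has an identical match in the other set.
--
--     Args:
--         reference_set: Tokenized reference set R
--         source_set: Tokenized source set S
--
--     Returns:
--         (list, list, int):  Reduced reference set, reduced source set and number
--                             of identical elements.
--     """
--     r_reduced = reference_set[:]
--     s_reduced = source_set[:]
--     count = 0
--     for elem in reference_set:
--         if elem in s_reduced: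
--             s_reduced.remove(elem)
--             r_reduced.remove(elem)
--             count += 1
--     return (r_reduced, s_reduced, count)
-- ===== SOURCE B (Python) =====
-- def reduce_sets(reference_set: list, source_set: list) -> tuple:
--     count = sum(min(reference_set.count(v), source_set.count(v))
--                 for v in dict.fromkeys(reference_set))
--     r_reduced = [v for i, v in enumerate(reference_set)
--                  if reference_set[:i].count(v) >= source_set.count(v)]
--     s_reduced = [v for i, v in enumerate(source_set)
--                  if source_set[:i].count(v) >= reference_set.count(v)]
--     return (r_reduced, s_reduced, count)
-- ===== Notes on version B (the rewrite author's own statement) =====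
-- stated objective: simpler
-- what changed: Replaces A's interleaved scan that destructively .remove()s matched elements from copies of both lists with three independent closed-form computations: the match count as a sum of per-distinct-value count minima, and each reduced list as a comprehension keeping an occurrence iff its occurrence index (prefix count) is at least the other list's count of that value.
import Mathlib
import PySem

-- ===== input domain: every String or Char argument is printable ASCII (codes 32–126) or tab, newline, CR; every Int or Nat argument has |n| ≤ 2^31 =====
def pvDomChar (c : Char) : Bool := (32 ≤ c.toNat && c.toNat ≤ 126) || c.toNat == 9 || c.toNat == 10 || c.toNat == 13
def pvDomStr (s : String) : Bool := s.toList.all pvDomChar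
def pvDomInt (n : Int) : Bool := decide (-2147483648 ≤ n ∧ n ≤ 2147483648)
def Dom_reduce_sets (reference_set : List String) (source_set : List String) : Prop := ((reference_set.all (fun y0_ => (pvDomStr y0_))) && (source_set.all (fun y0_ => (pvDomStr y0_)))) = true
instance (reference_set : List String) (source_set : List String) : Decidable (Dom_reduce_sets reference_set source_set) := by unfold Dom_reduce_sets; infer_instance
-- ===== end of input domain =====

-- B replaces A's interleaved scan-and-remove with independent closed-form count-based
-- comprehensions (different decomposition; same asymptotic cost, simpler code).


-- ===== PORT A =====
-- loop body of A's for-loop; state is (r_reduced, s_reduced, count).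
-- The two .remove(elem) calls are guarded by 'elem in s_reduced', so remove? is some there;
-- getD only discharges the Option.
def reduceStepA (st : List String × List String × Int) (elem : String) :
    List String × List String × Int :=
  if st.2.1.contains elem then
    ((PySem.List.remove? st.1 elem).getD st.1,
     (PySem.List.remove? st.2.1 elem).getD st.2.1,
     st.2.2 + 1)
  else st

def reduce_sets (reference_set : List String) (source_set : List String) :
    List String × List String × Int :=
  reference_set.foldl reduceStepA (reference_set, source_set, 0)

-- ===== PORT B =====
def reduce_sets_alt (reference_set : List String) (source_set : List String) :
    List String × List String × Int :=
  let count : Int := ((PySem.List.dedup reference_set).map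
      (fun v => min ((PySem.List.count reference_set v : Int))
                    ((PySem.List.count source_set v : Int)))).sum
  let r_reduced := ((PySem.List.enumerate reference_set).filter
      (fun p => decide (PySem.List.count source_set p.2 ≤
        PySem.List.count (PySem.List.slice reference_set none (some p.1)) p.2))).map (·.2)
  let s_reduced := ((PySem.List.enumerate source_set).filter
      (fun p => decide (PySem.List.count reference_set p.2 ≤
        PySem.List.count (PySem.List.slice source_set none (some p.1)) p.2))).map (·.2)
  (r_reduced, s_reduced, count)

-- ===== PRECONDITION & SPEC =====
def Spec_reduce_sets (reference_set : List String) (source_set : List String) (out : List String × List String × Int) : Prop := out = reduce_sets_alt reference_set source_set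
instance (reference_set : List String) (source_set : List String) (out : List String × List String × Int) : Decidable (Spec_reduce_sets reference_set source_set out) := by unfold Spec_reduce_sets; infer_instance

-- ===== CLAIM (what is proved, stated in full; the proofs are below) =====
def Claim_equal_reduce_sets : Prop := ∀ (reference_set : List String) (source_set : List String), Dom_reduce_sets reference_set source_set → Spec_reduce_sets reference_set source_set (reduce_sets reference_set source_set)

-- ===== LEMMAS AND PROOFS =====

-- 'strip f xs' drops, for each value v, the first 'f v' occurrences of v from xs.
def strip (f : String → Nat) : List String → List String
  | [] => []
  | x :: xs =>
    if 0 < f x then strip (fun v => if v = x then f v - 1 else f v) xs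
    else x :: strip f xs

theorem count_strip (xs : List String) (f : String → Nat) (v : String) :
    List.count v (strip f xs) = List.count v xs - f v := by
  induction xs generalizing f with
  | nil => simp [strip]
  | cons x xs ih =>
    simp only [strip]
    by_cases hx : 0 < f x
    · rw [if_pos hx, ih]
      by_cases hv : v = x
      · subst hv; simp [List.count_cons_self]; omega
      · simp [Ne.symm hv, hv]
    · rw [if_neg hx]
      by_cases hv : v = x
      · subst hv; simp [List.count_cons_self, ih f]; omega
      · simp [Ne.symm hv, ih f]

theorem mem_strip (xs : List String) (f : String → Nat) (v : String) :
    v ∈ strip f xs ↔ f v < List.count v xs := by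
  rw [← List.count_pos_iff, count_strip]; omega

theorem strip_congr (xs : List String) (f g : String → Nat)
    (h : ∀ v, min (f v) (List.count v xs) = min (g v) (List.count v xs)) :
    strip f xs = strip g xs := by
  induction xs generalizing f g with
  | nil => rfl
  | cons x xs ih =>
    have hx := h x
    simp only [List.count_cons_self] at hx
    simp only [strip]
    by_cases hfx : 0 < f x
    · have hgx : 0 < g x := by omega
      rw [if_pos hfx, if_pos hgx]
      apply ih
      intro v
      by_cases hv : v = x
      · subst hv; simp; omega
      · have := h v
        simp only [List.count_cons, beq_iff_eq, Ne.symm hv, if_false] at this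
        simp only [if_neg hv]
        omega
    · have hgx : ¬ 0 < g x := by omega
      rw [if_neg hfx, if_neg hgx]
      congr 1
      apply ih
      intro v
      by_cases hv : v = x
      · subst hv; omega
      · have := h v
        simp only [List.count_cons, beq_iff_eq, Ne.symm hv, if_false] at this
        omega

theorem erase_strip (xs : List String) (f : String → Nat) (v : String)
    (h : f v < List.count v xs) :
    (strip f xs).erase v = strip (fun u => if u = v then f u + 1 else f u) xs := by
  induction xs generalizing f with
  | nil => simp at h
  | cons x xs ih =>
    simp only [strip]
    by_cases hx : 0 < f x
    · rw [if_pos hx]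
      have hgx : 0 < (fun u => if u = v then f u + 1 else f u) x := by
        by_cases hxv : x = v
        · simp [hxv]
        · simp [hxv]; omega
      rw [if_pos hgx]
      have h' : (fun u => if u = x then f u - 1 else f u) v < List.count v xs := by
        by_cases hv : v = x
        · subst hv
          simp only [List.count_cons_self] at h
          simp
          omega
        · simp only [if_neg hv]
          simpa [List.count_cons, Ne.symm hv] using h
      rw [ih _ h']
      congr 1
      funext u
      by_cases hu2 : u = v
      · subst hu2
        by_cases hu1 : u = x
        · subst hu1; simp; omega
        · simp [hu1]
      · by_cases hu1 : u = x
        · subst hu1; simp [hu2]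
        · simp [hu1, hu2]
    · rw [if_neg hx]
      by_cases hxv : x = v
      · subst hxv
        rw [List.erase_cons_head]
        have : (fun u => if u = x then f u + 1 else f u) x > 0 := by simp
        rw [if_pos this]
        congr 1
        funext u
        by_cases hu : u = x <;> simp [hu]
      · rw [List.erase_cons_tail (by simpa using hxv)]
        have : ¬ 0 < (fun u => if u = v then f u + 1 else f u) x := by simp [hxv]; omega
        rw [if_neg this]
        congr 1
        apply ih
        simpa [List.count_cons, hxv] using h

theorem strip_zero (xs : List String) : strip (fun _ => 0) xs = xs := by
  induction xs with
  | nil => rfl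
  | cons x xs ih => simp [strip, ih]

theorem sum_map_bump (d : List String) (g : String → Int) (e : String)
    (hn : d.Nodup) (he : e ∈ d) :
    (d.map (fun v => if v = e then g v + 1 else g v)).sum = (d.map g).sum + 1 := by
  induction d with
  | nil => simp at he
  | cons x d ih =>
    rcases List.nodup_cons.mp hn with ⟨hx, hd⟩
    rcases List.mem_cons.mp he with he1 | he2
    · subst he1
      simp only [List.map_cons, List.sum_cons, if_pos rfl]
      have heq : d.map (fun v => if v = e then g v + 1 else g v) = d.map g := by
        apply List.map_congr_left
        intro v hv
        have : v ≠ e := fun hvx => hx (hvx ▸ hv)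
        simp [this]
      rw [heq]
      simp
      ring
    · have hxe : x ≠ e := fun hxe => hx (hxe ▸ he2)
      simp only [List.map_cons, List.sum_cons, if_neg hxe]
      rw [ih hd he2]; ring

-- B's comprehension shape, generalised over an already-seen prefix, equals strip.
theorem filter_enum_eq_strip (xs : List String) : ∀ (pre : List String) (f : String → Nat),
    ((PySem.List.enumerate xs (pre.length : Int)).filter
        (fun p => decide (f p.2 ≤ List.count p.2
          (PySem.List.slice (pre ++ xs) none (some p.1))))).map (·.2)
      = strip (fun v => f v - List.count v pre) xs := by
  induction xs with
  | nil => intro pre f; simp [PySem.List.enumerate_nil, strip]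
  | cons x xs ih =>
    intro pre f
    rw [PySem.List.enumerate_cons]
    have hsl : PySem.List.slice (pre ++ x :: xs) none (some (pre.length : Int))
        = pre := by
      rw [PySem.List.slice_to_natCast, List.take_left]
    have hpre1 : ((pre.length : Int) + 1) = (((pre ++ [x]).length : Nat) : Int) := by
      simp
    have happ : pre ++ x :: xs = (pre ++ [x]) ++ xs := by simp
    simp only [List.filter_cons, hsl]
    by_cases hc : f x ≤ List.count x pre
    · rw [if_pos (by simpa using hc)]
      simp only [List.map_cons]
      have hrec := ih (pre ++ [x]) f
      rw [hpre1, happ]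
      rw [hrec]
      have hstrip : strip (fun v => f v - List.count v pre) (x :: xs)
          = x :: strip (fun v => f v - List.count v pre) xs := by
        simp only [strip]
        rw [if_neg (by omega)]
      rw [hstrip]
      congr 1
      congr 1
      funext v
      by_cases hv : v = x
      · subst hv; simp [List.count_append, List.count_singleton]; omega
      · simp [List.count_append, List.count_cons, Ne.symm hv, hv]
    · rw [if_neg (by simpa using hc)]
      have hrec := ih (pre ++ [x]) f
      rw [hpre1, happ, hrec]
      have hstrip : strip (fun v => f v - List.count v pre) (x :: xs)
          = strip (fun v => if v = x then (f v - List.count v pre) - 1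
              else f v - List.count v pre) xs := by
        simp only [strip]
        rw [if_pos (by omega)]
      rw [hstrip]
      congr 1
      funext v
      by_cases hv : v = x
      · subst hv; simp [List.count_append]; omega
      · simp [List.count_append, List.count_cons, Ne.symm hv, hv]

def mfun (P S : List String) : String → Nat := fun v => min (List.count v P) (List.count v S)

def csum (R P S : List String) : Int :=
  ((PySem.List.dedup R).map (fun v => ((mfun P S v : Nat) : Int))).sum

theorem A_loop (T : List String) : ∀ (P S R : List String), R = P ++ T →
    T.foldl reduceStepA (strip (mfun P S) R, strip (mfun P S) S, csum R P S)
      = (strip (mfun R S) R, strip (mfun R S) S, csum R R S) := by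
  induction T with
  | nil =>
    intro P S R hR
    rw [List.append_nil] at hR
    subst hR
    rfl
  | cons e T ih =>
    intro P S R hR
    have hcntR : List.count e P < List.count e R := by
      rw [hR]; simp [List.count_append, List.count_cons_self]
    rw [List.foldl_cons]
    by_cases h : List.count e P < List.count e S
    · have hmemS : e ∈ strip (mfun P S) S :=
        (mem_strip S (mfun P S) e).mpr (by unfold mfun; omega)
      have hmemR : e ∈ strip (mfun P S) R :=
        (mem_strip R (mfun P S) e).mpr (by unfold mfun; omega)
      have hbump : (fun u => if u = e then mfun P S u + 1 else mfun P S u)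
          = mfun (P ++ [e]) S := by
        funext u
        unfold mfun
        by_cases hu : u = e
        · subst hu; simp [List.count_append]; omega
        · have h1 : List.count u [e] = 0 := by
            simp [Ne.symm hu]
          simp [List.count_append, h1, hu]
      have hstep : reduceStepA (strip (mfun P S) R, strip (mfun P S) S, csum R P S) e
          = (strip (mfun (P ++ [e]) S) R, strip (mfun (P ++ [e]) S) S, csum R (P ++ [e]) S) := by
        unfold reduceStepA
        rw [if_pos (List.elem_eq_true_of_mem hmemS)]
        rw [PySem.List.remove?_eq_some_erase _ e hmemR,
            PySem.List.remove?_eq_some_erase _ e hmemS]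
        simp only [Option.getD_some]
        rw [erase_strip R (mfun P S) e (by unfold mfun; omega),
            erase_strip S (mfun P S) e (by unfold mfun; omega), hbump]
        have hcsum : csum R (P ++ [e]) S = csum R P S + 1 := by
          unfold csum
          have hfun : (fun v => ((mfun (P ++ [e]) S v : Nat) : Int))
              = fun v => if v = e then ((mfun P S v : Nat) : Int) + 1
                  else ((mfun P S v : Nat) : Int) := by
            funext v
            rw [← hbump]
            by_cases hv : v = e <;> simp [hv]
          rw [hfun]
          exact sum_map_bump (PySem.List.dedup R) _ e (PySem.List.nodup_dedup R)
            ((PySem.List.mem_dedup R e).mpr (by rw [hR]; simp))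
        rw [hcsum]
      rw [hstep]
      exact ih (P ++ [e]) S R (by rw [hR]; simp)
    · have hmfun : mfun (P ++ [e]) S = mfun P S := by
        funext u
        unfold mfun
        by_cases hu : u = e
        · subst hu; simp [List.count_append]; omega
        · have h1 : List.count u [e] = 0 := by
            simp [Ne.symm hu]
          simp [List.count_append, h1]
      have hnmem : e ∉ strip (mfun P S) S := by
        rw [mem_strip]; unfold mfun; omega
      have hstep : reduceStepA (strip (mfun P S) R, strip (mfun P S) S, csum R P S) e
          = (strip (mfun P S) R, strip (mfun P S) S, csum R P S) := by
        unfold reduceStepA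
        rw [if_neg (by simpa using hnmem)]
      rw [hstep]
      have hcsum : csum R (P ++ [e]) S = csum R P S := by
        unfold csum; rw [hmfun]
      have := ih (P ++ [e]) S R (by rw [hR]; simp)
      rw [hmfun, hcsum] at this
      exact this

-- ===== VERDICT (by name: the statement is the Claim_ definition above) =====
theorem strip_counts_r (R S : List String) :
    strip (fun v => List.count v S) R = strip (mfun R S) R := by
  apply strip_congr
  intro v
  unfold mfun
  omega

theorem strip_counts_s (R S : List String) :
    strip (fun v => List.count v R) S = strip (mfun R S) S := by
  apply strip_congr
  intro v
  unfold mfun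
  omega

theorem reduce_sets_spec : Claim_equal_reduce_sets := by
  intro R S _
  unfold Spec_reduce_sets reduce_sets reduce_sets_alt
  have hm0 : mfun [] S = fun _ => 0 := by funext v; simp [mfun]
  have h0 : (R, S, (0 : Int)) = (strip (mfun [] S) R, strip (mfun [] S) S, csum R [] S) := by
    rw [hm0, strip_zero, strip_zero]
    simp [csum, hm0]
  rw [h0, A_loop R [] S R (by simp)]
  simp only [PySem.List.count_eq]
  have hr := filter_enum_eq_strip R [] (fun v => List.count v S)
  have hs := filter_enum_eq_strip S [] (fun v => List.count v R)
  simp only [List.length_nil, Nat.cast_zero, List.nil_append, List.count_nil] at hr hs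
  refine Prod.ext ?_ (Prod.ext ?_ ?_)
  · exact (strip_counts_r R S).symm.trans hr.symm
  · exact (strip_counts_s R S).symm.trans hs.symm
  · simp only [csum]
    congr 1
    apply List.map_congr_left
    intro v _
    unfold mfun
    push_cast
    rfl
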